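-- pv_equiv track=rewrite | github.com/CHANCHALCHAVHAN/Company_Problem-statement-and-its-Solutions | Enchanted Lanterns: Calculating the Sum of Wish Values.py | calculate_wish_value
-- ===== SOURCE A (Python) =====
-- def calculate_wish_value(N, A):
--     # Step 1: Compute suffix maximums
--     suffix_max = [0] * N
--     suffix_max[N - 1] = A[N - 1]
--     for i in range(N - 2, -1, -1):
--         suffix_max[i] = max(suffix_max[i + 1], A[i])
--
--     # Step 2: Compute prefix minimums and wish values
--     prefix_min = [0] * N
--     prefix_min[0] = A[0]
--     total_wish_value = 0
--
--     for i in range(1, N):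
--         prefix_min[i] = min(prefix_min[i - 1], A[i])
--
--     # Step 3: Calculate wish values
--     for i in range(N):
--         total_wish_value += abs(suffix_max[i] - prefix_min[i])
--
--     return total_wish_value
-- ===== SOURCE B (Python) =====
-- def calculate_wish_value(N, A):
--     # Run-length contribution counting: |suffix_max - prefix_min| is always
--     # suffix_max - prefix_min, and each running extremum holds over a whole block
--     # of indices, so each new record value is charged once, multiplied by the
--     # length of the block it covers -- no per-index extremum is summed.
--     total = 0
--     cur, cnt = A[0], 0
--     for x in A[:N]:
--         if x < cur:
--             total -= cur * cnt
--             cur, cnt = x, 1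
--         else:
--             cnt += 1
--     total -= cur * cnt
--     cur, cnt = A[N - 1], 0
--     for x in reversed(A[:N]):
--         if x > cur:
--             total += cur * cnt
--             cur, cnt = x, 1
--         else:
--             cnt += 1
--     total += cur * cnt
--     return total
-- ===== Notes on version B (the rewrite author's own statement) =====
-- stated objective: alternative
-- what changed: Drops the abs (suffix_max[i] >= A[i] >= prefix_min[i]) and replaces the three stored arrays and per-index sum by run-length contribution counting: each new running-min/max record is charged once, multiplied by the length of the index block it covers, in O(1) extra space.
import Mathlib
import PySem

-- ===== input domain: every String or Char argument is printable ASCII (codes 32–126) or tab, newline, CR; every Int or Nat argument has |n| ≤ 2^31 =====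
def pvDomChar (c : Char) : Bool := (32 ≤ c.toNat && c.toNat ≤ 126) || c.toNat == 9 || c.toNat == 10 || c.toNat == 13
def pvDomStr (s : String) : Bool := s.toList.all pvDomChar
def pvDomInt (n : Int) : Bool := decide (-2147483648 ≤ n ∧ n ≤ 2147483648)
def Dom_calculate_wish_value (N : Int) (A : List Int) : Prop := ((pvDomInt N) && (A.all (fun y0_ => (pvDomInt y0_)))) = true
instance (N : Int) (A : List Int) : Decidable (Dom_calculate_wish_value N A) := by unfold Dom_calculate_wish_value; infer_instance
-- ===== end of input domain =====

-- B replaces A's three stored arrays and the per-index abs-sum by run-length contribution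
-- counting over the running-min/max records (the abs is redundant since suffix_max[i] >= prefix_min[i]).


-- ===== PORT A =====
def calculate_wish_value (N : Int) (A : List Int) : Int :=
  -- suffix_max = [0] * N; suffix_max[N-1] = A[N-1]; for i in range(N-2, -1, -1): ...
  let suffix_max := List.replicate N.toNat (0 : Int)
  let suffix_max := PySem.List.pySetD suffix_max (N - 1) (PySem.List.pyGetD A (N - 1) 0)
  let suffix_max := (PySem.List.pyRange (N - 2) (-1) (-1)).foldl
    (fun sm i => PySem.List.pySetD sm i
      (max (PySem.List.pyGetD sm (i + 1) 0) (PySem.List.pyGetD A i 0))) suffix_max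
  -- prefix_min = [0] * N; prefix_min[0] = A[0]; for i in range(1, N): ...
  let prefix_min := List.replicate N.toNat (0 : Int)
  let prefix_min := PySem.List.pySetD prefix_min 0 (PySem.List.pyGetD A 0 0)
  let prefix_min := (PySem.List.pyRange 1 N 1).foldl
    (fun pm i => PySem.List.pySetD pm i
      (min (PySem.List.pyGetD pm (i - 1) 0) (PySem.List.pyGetD A i 0))) prefix_min
  -- for i in range(N): total_wish_value += abs(suffix_max[i] - prefix_min[i])
  (PySem.List.pyRange 0 N 1).foldl
    (fun t i => t + |PySem.List.pyGetD suffix_max i 0 - PySem.List.pyGetD prefix_min i 0|) 0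

-- ===== PORT B =====
def calculate_wish_value_alt (N : Int) (A : List Int) : Int :=
  -- cur, cnt = A[0], 0; for x in A[:N]: if x < cur: total -= cur*cnt; cur, cnt = x, 1 else cnt += 1
  let cur0 := PySem.List.pyGetD A 0 0
  let s1 := (PySem.List.slice A none (some N)).foldl
    (fun (st : Int × Int × Int) x =>
      if x < st.1 then (x, 1, st.2.2 - st.1 * st.2.1)
      else (st.1, st.2.1 + 1, st.2.2)) (cur0, 0, 0)
  let t1 := s1.2.2 - s1.1 * s1.2.1
  -- cur, cnt = A[N-1], 0; for x in reversed(A[:N]): if x > cur: total += cur*cnt; cur, cnt = x, 1 else cnt += 1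
  let cur1 := PySem.List.pyGetD A (N - 1) 0
  let s2 := (PySem.List.slice A none (some N)).reverse.foldl
    (fun (st : Int × Int × Int) x =>
      if st.1 < x then (x, 1, st.2.2 + st.1 * st.2.1)
      else (st.1, st.2.1 + 1, st.2.2)) (cur1, 0, t1)
  s2.2.2 + s2.1 * s2.2.1

-- ===== PRECONDITION & SPEC =====
-- Pre_ excludes exactly the inputs on which A raises IndexError: N <= 0 (assignment
-- suffix_max[N-1] on an empty array) or N > len(A) (reading A[N-1]).
def Pre_calculate_wish_value (N : Int) (A : List Int) : Prop := 1 ≤ N ∧ N ≤ (A.length : Int)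
instance (N : Int) (A : List Int) : Decidable (Pre_calculate_wish_value N A) := by
  unfold Pre_calculate_wish_value; infer_instance
def pvWitness_calculate_wish_value : Int × List Int := (3, [2, -5, 4])

def Spec_calculate_wish_value (N : Int) (A : List Int) (out : Int) : Prop := out = calculate_wish_value_alt N A
instance (N : Int) (A : List Int) (out : Int) : Decidable (Spec_calculate_wish_value N A out) := by unfold Spec_calculate_wish_value; infer_instance

-- ===== CLAIM (what is proved, stated in full; the proofs are below) =====
def Claim_equal_calculate_wish_value : Prop := ∀ (N : Int) (A : List Int), Dom_calculate_wish_value N A → Pre_calculate_wish_value N A → Spec_calculate_wish_value N A (calculate_wish_value N A)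

-- ===== LEMMAS AND PROOFS =====

def runMin (c : Int) : List Int → List Int
  | [] => []
  | x :: t => min c x :: runMin (min c x) t

def runMax (c : Int) : List Int → List Int
  | [] => []
  | x :: t => max c x :: runMax (max c x) t

theorem runMin_length (c : Int) (l : List Int) : (runMin c l).length = l.length := by
  induction l generalizing c with
  | nil => rfl
  | cons x t ih => simp [runMin, ih]

theorem runMax_length (c : Int) (l : List Int) : (runMax c l).length = l.length := by
  induction l generalizing c with
  | nil => rfl
  | cons x t ih => simp [runMax, ih]

theorem runMin_le (c : Int) (l : List Int) : List.Forall₂ (· ≤ ·) (runMin c l) l := by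
  induction l generalizing c with
  | nil => exact List.Forall₂.nil
  | cons x t ih => exact List.Forall₂.cons (min_le_right c x) (ih _)

theorem le_runMax (c : Int) (l : List Int) : List.Forall₂ (· ≤ ·) l (runMax c l) := by
  induction l generalizing c with
  | nil => exact List.Forall₂.nil
  | cons x t ih => exact List.Forall₂.cons (le_max_right c x) (ih _)

-- B's first loop: grouped contribution equals the running-min sum
theorem foldl_group_min (l : List Int) (cur cnt tot : Int) :
    (let r := l.foldl
      (fun (st : Int × Int × Int) x =>
        if x < st.1 then (x, 1, st.2.2 - st.1 * st.2.1)
        else (st.1, st.2.1 + 1, st.2.2)) (cur, cnt, tot);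
     r.2.2 - r.1 * r.2.1) = tot - cur * cnt - (runMin cur l).sum := by
  induction l generalizing cur cnt tot with
  | nil => simp [runMin]
  | cons x l ih =>
    by_cases h : x < cur
    · simp only [List.foldl_cons, if_pos h, ih, runMin, List.sum_cons,
        min_eq_right (le_of_lt h)]
      ring
    · simp only [List.foldl_cons, if_neg h, ih, runMin, List.sum_cons,
        min_eq_left (by omega : cur ≤ x)]
      ring

-- B's second loop: grouped contribution equals the running-max sum
theorem foldl_group_max (l : List Int) (cur cnt tot : Int) :
    (let r := l.foldl
      (fun (st : Int × Int × Int) x =>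
        if st.1 < x then (x, 1, st.2.2 + st.1 * st.2.1)
        else (st.1, st.2.1 + 1, st.2.2)) (cur, cnt, tot);
     r.2.2 + r.1 * r.2.1) = tot + cur * cnt + (runMax cur l).sum := by
  induction l generalizing cur cnt tot with
  | nil => simp [runMax]
  | cons x l ih =>
    by_cases h : cur < x
    · simp only [List.foldl_cons, if_pos h, ih, runMax, List.sum_cons,
        max_eq_right (le_of_lt h)]
      ring
    · simp only [List.foldl_cons, if_neg h, ih, runMax, List.sum_cons,
        max_eq_left (by omega : x ≤ cur)]
      ring

theorem forall2_le_trans {a b c : List Int}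
    (h1 : List.Forall₂ (· ≤ ·) a b) (h2 : List.Forall₂ (· ≤ ·) b c) :
    List.Forall₂ (· ≤ ·) a c := by
  induction h1 generalizing c with
  | nil => cases h2; exact List.Forall₂.nil
  | cons hxy _ ih =>
    cases h2 with
    | cons hyz h2t => exact List.Forall₂.cons (le_trans hxy hyz) (ih h2t)

theorem sum_abs_sub (s p : List Int) (h : List.Forall₂ (· ≤ ·) p s) :
    ((s.zip p).map (fun q => |q.1 - q.2|)).sum = s.sum - p.sum := by
  induction h with
  | nil => simp
  | cons hxy ht ih =>
    simp only [List.zip_cons_cons, List.map_cons, List.sum_cons, ih, List.sum_cons]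
    rw [abs_of_nonneg (by omega)]; ring

theorem pref_loop (Aall : List Int) (t : List Int) :
    ∀ (done rest : List Int) (h : done ≠ []),
    Aall.drop done.length = t ++ rest →
    (PySem.List.pyRange (done.length : Int) ((done.length : Int) + t.length) 1).foldl
      (fun pm i => PySem.List.pySetD pm i
        (min (PySem.List.pyGetD pm (i - 1) 0) (PySem.List.pyGetD Aall i 0)))
      (done ++ List.replicate t.length 0)
    = done ++ runMin (done.getLast h) t := by
  induction t with
  | nil =>
    intro done rest h hdrop
    rw [PySem.List.pyRange_one_eq_nil (by simp)]
    simp [runMin]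
  | cons x t ih =>
    intro done rest h hdrop
    have hd1 : 1 ≤ done.length := List.length_pos_of_ne_nil h
    rw [PySem.List.pyRange_one_cons (by push_cast [List.length_cons]; omega)]
    rw [List.foldl_cons]
    have hx : PySem.List.pyGetD Aall (done.length : Int) 0 = x := by
      have h0 : (Aall.drop done.length)[0]? = some x := by rw [hdrop]; simp
      rw [List.getElem?_drop] at h0
      simp only [Nat.add_zero] at h0
      simp [PySem.List.pyGetD_natCast, List.getD_eq_getElem?_getD, h0]
    have hprev : PySem.List.pyGetD (done ++ List.replicate (x :: t).length 0) ((done.length : Int) - 1) 0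
        = done.getLast h := by
      have hcast : (done.length : Int) - 1 = ((done.length - 1 : Nat) : Int) := by omega
      rw [hcast, PySem.List.pyGetD_natCast]
      rw [List.getD_eq_getElem?_getD, List.getElem?_append_left (by omega)]
      rw [List.getElem?_eq_getElem (by omega)]
      simp [List.getLast_eq_getElem h]
    rw [hx, hprev]
    have hset : PySem.List.pySetD (done ++ List.replicate (x :: t).length 0) (done.length : Int)
        (min (done.getLast h) x) = (done ++ [min (done.getLast h) x]) ++ List.replicate t.length 0 := by
      rw [PySem.List.pySetD_natCast]
      simp [List.replicate_succ]
    rw [hset]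
    have hdrop' : Aall.drop (done ++ [min (done.getLast h) x]).length = t ++ rest := by
      simp only [List.length_append, List.length_cons, List.length_nil]
      rw [List.drop_add_one_eq_tail_drop, hdrop]; simp
    have := ih (done ++ [min (done.getLast h) x]) rest (by simp) hdrop'
    rw [show ((done.length : Int) + 1) = (((done ++ [min (done.getLast h) x]).length : Int)) by simp,
        show ((done.length : Int) + (x :: t).length) = (((done ++ [min (done.getLast h) x]).length : Int) + t.length) by simp; ring] at *
    rw [this]
    simp [runMin]

theorem suf_loop (Aall : List Int) (u : List Int) :
    ∀ (done : List Int) (h : done ≠ []),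
    Aall.take u.length = u →
    (PySem.List.pyRange ((u.length : Int) - 1) (-1) (-1)).foldl
      (fun sm i => PySem.List.pySetD sm i
        (max (PySem.List.pyGetD sm (i + 1) 0) (PySem.List.pyGetD Aall i 0)))
      (List.replicate u.length 0 ++ done)
    = (runMax (done.head h) u.reverse).reverse ++ done := by
  induction u using List.reverseRecOn with
  | nil =>
    intro done h htake
    rw [PySem.List.pyRange_neg_one_eq_nil (by simp)]
    simp [runMax]
  | append_singleton u' y ih =>
    intro done h htake
    have hlen : (u' ++ [y]).length = u'.length + 1 := by simp
    rw [hlen] at htake ⊢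
    rw [PySem.List.pyRange_neg_one_cons (by push_cast; omega)]
    rw [List.foldl_cons]
    have hidx : ((u'.length + 1 : Nat) : Int) - 1 = (u'.length : Int) := by push_cast; ring
    rw [hidx]
    have hy : PySem.List.pyGetD Aall (u'.length : Int) 0 = y := by
      have h0 := congrArg (fun l => l[u'.length]?) htake
      simp at h0
      simp [PySem.List.pyGetD_natCast, List.getD_eq_getElem?_getD, h0]
    have hnext : PySem.List.pyGetD (List.replicate (u'.length + 1) 0 ++ done) ((u'.length : Int) + 1) 0
        = done.head h := by
      have hcast : (u'.length : Int) + 1 = ((u'.length + 1 : Nat) : Int) := by push_cast; ring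
      rw [hcast, PySem.List.pyGetD_natCast]
      rw [List.getD_eq_getElem?_getD, List.getElem?_append_right (by simp)]
      simp [List.getElem?_eq_getElem (List.length_pos_of_ne_nil h), List.getElem_zero_eq_head]
    rw [hy, hnext]
    have hset : PySem.List.pySetD (List.replicate (u'.length + 1) 0 ++ done) (u'.length : Int)
        (max (done.head h) y)
        = List.replicate u'.length 0 ++ (max (done.head h) y :: done) := by
      rw [PySem.List.pySetD_natCast]
      rw [List.replicate_succ', List.append_assoc]
      simp
    rw [hset]
    have htake' : Aall.take u'.length = u' := by
      have : Aall.take u'.length = (Aall.take (u'.length + 1)).take u'.length := by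
        rw [List.take_take]; simp
      rw [this, htake, List.take_left]
    have := ih (max (done.head h) y :: done) (by simp) htake'
    rw [this]
    simp [runMax]

theorem ports_eq (N : Int) (A : List Int) (h1 : 1 ≤ N) (h2 : N ≤ (A.length : Int)) :
    calculate_wish_value N A = calculate_wish_value_alt N A := by
  have hNn : ((N.toNat : Nat) : Int) = N := by omega
  set n := N.toNat with hn
  have hn1 : 1 ≤ n := by omega
  have hnA : n ≤ A.length := by omega
  have hAne : A ≠ [] := by
    intro hc; rw [hc] at hnA; simp at hnA; omega
  -- names for the pieces
  set x0 := A.getD 0 0 with hx0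
  set xl := A.getD (n - 1) 0 with hxl
  set u := A.take (n - 1) with hu
  set t := (A.drop 1).take (n - 1) with ht
  have hul : u.length = n - 1 := by rw [hu]; simp; omega
  have htl : t.length = n - 1 := by rw [ht]; simp; omega
  have hxs1 : A.take n = x0 :: t := by
    cases A with
    | nil => exact absurd rfl hAne
    | cons a l =>
      rw [show n = (n-1)+1 by omega, List.take_succ_cons]
      simp [hx0, ht]
  have hxs2 : A.take n = u ++ [xl] := by
    rw [show n = (n-1)+1 by omega, List.take_add_one, hu, hxl]
    congr 1
    rw [List.getElem?_eq_getElem (by omega)]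
    simp [List.getD_eq_getElem?_getD, List.getElem?_eq_getElem (show n-1 < A.length by omega)]
  -- A side: suffix list
  have e1 : PySem.List.pyGetD A (N - 1) 0 = xl := by
    rw [show N - 1 = ((n-1 : Nat) : Int) by omega, PySem.List.pyGetD_natCast, hxl]
  have e2 : PySem.List.pySetD (List.replicate n (0:Int)) (N - 1) xl
      = List.replicate (n-1) 0 ++ [xl] := by
    rw [show N - 1 = ((n-1:Nat):Int) by omega, PySem.List.pySetD_natCast]
    conv_lhs => rw [show n = (n-1)+1 by omega, List.replicate_succ']
    simp
  have e3 : (PySem.List.pyRange (N - 2) (-1) (-1)).foldl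
      (fun sm i => PySem.List.pySetD sm i
        (max (PySem.List.pyGetD sm (i + 1) 0) (PySem.List.pyGetD A i 0)))
      (List.replicate (n-1) 0 ++ [xl])
      = (runMax xl u.reverse).reverse ++ [xl] := by
    have := suf_loop A u [xl] (by simp) (by rw [hul, hu])
    rw [show ((u.length : Int) - 1) = N - 2 by rw [hul]; omega, hul] at this
    simpa using this
  -- A side: prefix list
  have e4 : PySem.List.pyGetD A 0 0 = x0 := by
    rw [PySem.List.pyGetD_zero, hx0]
  have e5 : PySem.List.pySetD (List.replicate n (0:Int)) 0 x0 = x0 :: List.replicate (n-1) 0 := by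
    rw [show (0:Int) = ((0:Nat):Int) by simp, PySem.List.pySetD_natCast]
    rw [show n = (n-1)+1 by omega, List.replicate_succ]
    simp
  have e6 : (PySem.List.pyRange 1 N 1).foldl
      (fun pm i => PySem.List.pySetD pm i
        (min (PySem.List.pyGetD pm (i - 1) 0) (PySem.List.pyGetD A i 0)))
      (x0 :: List.replicate (n-1) 0)
      = x0 :: runMin x0 t := by
    have hdrop : A.drop ([x0].length) = t ++ (A.drop 1).drop (n-1) := by
      conv_rhs => rw [ht, List.take_append_drop]
      rfl
    have := pref_loop A t [x0] ((A.drop 1).drop (n-1)) (by simp) hdrop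
    rw [show (([x0].length : Int)) = 1 by simp,
        show ((1:Int) + (t.length : Int)) = N by rw [htl]; omega, htl] at this
    simpa using this
  -- lengths
  have hs_len : ((runMax xl u.reverse).reverse ++ [xl]).length = n := by
    simp [runMax_length, hul]; omega
  have hp_len : (x0 :: runMin x0 t).length = n := by
    simp [runMin_length, htl]; omega
  -- pointwise inequality
  have hps : List.Forall₂ (· ≤ ·) (x0 :: runMin x0 t) ((runMax xl u.reverse).reverse ++ [xl]) := by
    apply forall2_le_trans (b := A.take n)
    · rw [hxs1]; exact List.Forall₂.cons (le_refl x0) (runMin_le x0 t)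
    · rw [hxs2]
      apply List.rel_append
      · have := List.rel_reverse (le_runMax xl u.reverse)
        simpa using this
      · exact List.Forall₂.cons (le_refl xl) List.Forall₂.nil
  -- final loop
  have e7 : (PySem.List.pyRange 0 N 1).foldl
      (fun acc i => acc + |PySem.List.pyGetD ((runMax xl u.reverse).reverse ++ [xl]) i 0
        - PySem.List.pyGetD (x0 :: runMin x0 t) i 0|) 0
      = ((runMax xl u.reverse).reverse ++ [xl]).sum - (x0 :: runMin x0 t).sum := by
    set s := (runMax xl u.reverse).reverse ++ [xl] with hs
    set p := x0 :: runMin x0 t with hp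
    have hz : (s.zip p).length = n := by simp [hs_len, hp_len]
    rw [PySem.List.foldl_congr_mem _ _
      (fun acc i => acc + |(PySem.List.pyGetD (s.zip p) i ((0:Int),(0:Int))).1
        - (PySem.List.pyGetD (s.zip p) i ((0:Int),(0:Int))).2|) _
      (by
        intro acc i hi
        beta_reduce
        rw [PySem.List.mem_pyRange_one] at hi
        have hiN : i.toNat < n := by omega
        rw [PySem.List.pyGetD_eq_getElem s 0 hi.1 (by rw [hs_len]; omega),
            PySem.List.pyGetD_eq_getElem p 0 hi.1 (by rw [hp_len]; omega),
            PySem.List.pyGetD_eq_getElem (s.zip p) ((0:Int),(0:Int)) hi.1 (by rw [hz]; omega)]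
        simp [List.getElem_zip])]
    rw [show N = ((s.zip p).length : Int) by rw [hz]; omega]
    rw [PySem.List.foldl_pyRange_zero_pyGetD' (s.zip p) ((0:Int),(0:Int))
      (fun acc q => acc + |q.1 - q.2|) 0]
    rw [PySem.List.foldl_add (g := fun q : Int × Int => |q.1 - q.2|)]
    rw [sum_abs_sub s p hps]
    ring
  -- B-side pieces
  have hrm : runMin x0 (A.take n) = x0 :: runMin x0 t := by
    rw [hxs1]; simp [runMin]
  have hrev : (A.take n).reverse = xl :: u.reverse := by
    rw [hxs2]; simp
  have hrM : runMax xl (xl :: u.reverse) = xl :: runMax xl u.reverse := by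
    simp [runMax]
  -- assemble
  simp only [calculate_wish_value, calculate_wish_value_alt]
  rw [← hn]
  rw [e1, e2, e3, e4, e5, e6, e7]
  rw [PySem.List.slice_to A (show (0:Int) ≤ N by omega), ← hn]
  rw [foldl_group_min (A.take n) x0 0 0, hrm]
  rw [foldl_group_max ((A.take n).reverse) xl 0 _, hrev, hrM]
  simp [List.sum_append, List.sum_reverse]
  ring

-- ===== VERDICT (by name: the statement is the Claim_ definition above) =====
theorem calculate_wish_value_spec : Claim_equal_calculate_wish_value := by
  intro N A _ hpre
  unfold Spec_calculate_wish_value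
  exact ports_eq N A hpre.1 hpre.2
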